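-- pv_equiv track=rewrite | github.com/ttzytt/PyAutoGrade | tests/Block 4/tested_code/obfuscated_tested_codes [copied at 2024-04-22 10#59#52.136339]/1566/Unit 1/Cards/cards_functions.py | uno_who_played_what
-- ===== SOURCE A (Python) =====
-- def uno_who_played_what(cards_played, num_players = 4, starting_player = 0):
--
--     hands = []
--     player = 0
--     for _ in range(num_players):
--         hands.append([])
--         player += 1
--
--
--     player_index = starting_player
--     is_reverse = False
--
--     for card_index in range(len(cards_played)):
--         hands[player_index % num_players] = (hands[player_index % num_players]
--                                               + [cards_played[card_index]])
--         if cards_played[card_index] == 'reverse':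
--
--                 if is_reverse:
--                     is_reverse = False
--                     player_index += 1
--                 else:
--                     is_reverse = True
--                     player_index -= 1
--
--         elif cards_played[card_index] == 'skip':
--
--                 if is_reverse:
--                     player_index -= 2
--                 else:
--                     player_index += 2
--
--         else:
--                 if is_reverse:
--                     player_index -= 1
--                 else:
--                     player_index += 1
--     return hands
-- ===== SOURCE B (Python) =====
-- def uno_who_played_what(cards_played, num_players=4, starting_player=0):
--     # Closed-form reformulation: the direction of play before card i is
--     # (-1) ** (number of 'reverse' cards before i), and each card advances the
--     # turn by a table step times that sign; the seat of card i is
--     # (starting_player + sum of earlier signed steps) % num_players.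
--     BASE = {'reverse': -1, 'skip': 2}
--     signs = []
--     r = 0
--     for c in cards_played:
--         signs.append(1 - 2 * (r % 2))
--         r += (c == 'reverse')
--     seats = []
--     acc = starting_player
--     for c, s in zip(cards_played, signs):
--         seats.append(acc % num_players)
--         acc += BASE.get(c, 1) * s
--     hands = [[] for _ in range(num_players)]
--     for c, seat in zip(cards_played, seats):
--         hands[seat].append(c)
--     return hands
-- ===== Notes on version B (the rewrite author's own statement) =====
-- stated objective: alternative
-- what changed: B replaces A's boolean-direction state machine with branchy symmetric cases and per-card 'hands[i] = hands[i] + [card]' list rebuilds by a closed-form arithmetic formulation: direction = (-1)**(reverses seen so far), per-card step from a lookup table times that sign, seat = prefix sums modulo num_players, then a separate bucketing sweep appending each card to its seat.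
import Mathlib
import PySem

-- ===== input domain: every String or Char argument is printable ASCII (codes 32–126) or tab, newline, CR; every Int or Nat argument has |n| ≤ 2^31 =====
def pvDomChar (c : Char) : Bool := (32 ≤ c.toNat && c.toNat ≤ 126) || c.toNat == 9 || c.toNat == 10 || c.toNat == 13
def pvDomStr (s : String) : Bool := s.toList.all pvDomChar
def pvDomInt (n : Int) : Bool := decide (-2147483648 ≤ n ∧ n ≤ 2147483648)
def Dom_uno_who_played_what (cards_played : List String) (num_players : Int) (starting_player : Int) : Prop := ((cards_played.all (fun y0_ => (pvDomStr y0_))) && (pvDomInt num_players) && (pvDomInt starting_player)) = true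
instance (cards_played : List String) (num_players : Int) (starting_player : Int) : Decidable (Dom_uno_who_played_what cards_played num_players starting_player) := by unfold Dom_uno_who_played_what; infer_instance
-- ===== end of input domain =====

-- B replaces A's boolean-direction state machine by a closed-form arithmetic formulation
-- (direction = parity of reverses seen, step from a lookup table, seat = prefix sum mod n) plus a bucketing sweep.
-- Equivalence of RETURN values; neither version mutates its arguments.

-- ===== PORT A =====
-- A's main loop: hands[pos % n] += [card], then advance pos/rev by the card's kind.
-- pyGetD/pySetD are exact for the in-range index pos % n (guaranteed when 0 < n, i.e. inside Pre_).
def unoDealA (n : Int) : List String → List (List String) → Int → Bool → List (List String)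
  | [], hands, _, _ => hands
  | c :: rest, hands, pos, rev =>
    let i := PySem.Int.mod pos n
    let hands' := PySem.List.pySetD hands i (PySem.List.pyGetD hands i [] ++ [c])
    if c = "reverse" then
      if rev then unoDealA n rest hands' (pos + 1) false
      else unoDealA n rest hands' (pos - 1) true
    else if c = "skip" then
      unoDealA n rest hands' (if rev then pos - 2 else pos + 2) rev
    else
      unoDealA n rest hands' (if rev then pos - 1 else pos + 1) rev

def uno_who_played_what (cards_played : List String) (num_players : Int) (starting_player : Int) : List (List String) :=
  let hands := (PySem.List.pyRange 0 num_players 1).foldl (fun h _ => h ++ [([] : List String)]) []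
  unoDealA num_players cards_played hands starting_player false

-- ===== PORT B =====
-- B's step table BASE = {'reverse': -1, 'skip': 2}
def unoBase : PySem.Dict String Int := PySem.Dict.ofList [("reverse", -1), ("skip", 2)]

-- B pass 1: signs[i] = 1 - 2 * (r % 2) with r = reverses strictly before card i
def unoSigns : List String → Int → List Int
  | [], _ => []
  | c :: rest, r =>
    (1 - 2 * PySem.Int.mod r 2) :: unoSigns rest (r + (if c = "reverse" then 1 else 0))

-- B pass 2: seats[i] = acc % n, acc += BASE.get(c, 1) * s
def unoSeats (n : Int) : List (String × Int) → Int → List Int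
  | [], _ => []
  | (c, s) :: rest, acc =>
    PySem.Int.mod acc n :: unoSeats n rest (acc + unoBase.getD c 1 * s)

-- B pass 3: one empty bucket per player, then one sweep appending each card to its seat's bucket.
def uno_who_played_what_alt (cards_played : List String) (num_players : Int) (starting_player : Int) : List (List String) :=
  let signs := unoSigns cards_played 0
  let seats := unoSeats num_players (cards_played.zip signs) starting_player
  let hands := (PySem.List.pyRange 0 num_players 1).map (fun _ => ([] : List String))
  (cards_played.zip seats).foldl
    (fun h cs => PySem.List.pySetD h cs.2 (PySem.List.pyGetD h cs.2 [] ++ [cs.1])) hands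

-- ===== PRECONDITION & SPEC =====
-- A raises (ZeroDivisionError or IndexError at the first card) iff num_players ≤ 0 and cards_played is nonempty; Pre_ excludes exactly that.
def Pre_uno_who_played_what (cards_played : List String) (num_players : Int) (starting_player : Int) : Prop :=
  cards_played = [] ∨ 0 < num_players
instance (cards_played : List String) (num_players : Int) (starting_player : Int) : Decidable (Pre_uno_who_played_what cards_played num_players starting_player) := by unfold Pre_uno_who_played_what; infer_instance

def pvWitness_uno_who_played_what : List String × Int × Int := (["skip", "reverse", "7"], 3, 1)

def Spec_uno_who_played_what (cards_played : List String) (num_players : Int) (starting_player : Int) (out : List (List String)) : Prop := out = uno_who_played_what_alt cards_played num_players starting_player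
instance (cards_played : List String) (num_players : Int) (starting_player : Int) (out : List (List String)) : Decidable (Spec_uno_who_played_what cards_played num_players starting_player out) := by unfold Spec_uno_who_played_what; infer_instance

-- ===== CLAIM =====
def Claim_equal_uno_who_played_what : Prop := ∀ (cards_played : List String) (num_players : Int) (starting_player : Int), Dom_uno_who_played_what cards_played num_players starting_player → Pre_uno_who_played_what cards_played num_players starting_player → Spec_uno_who_played_what cards_played num_players starting_player (uno_who_played_what cards_played num_players starting_player)

-- ===== LEMMAS AND PROOFS =====

-- proof-side reference: the seat of each card, in play order, as A's state machine computes it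
def unoOwners (n : Int) : List String → Int → Bool → List Int
  | [], _, _ => []
  | c :: rest, pos, rev =>
    PySem.Int.mod pos n ::
      (if c = "reverse" then
         if rev then unoOwners n rest (pos + 1) false else unoOwners n rest (pos - 1) true
       else if c = "skip" then unoOwners n rest (if rev then pos - 2 else pos + 2) rev
       else unoOwners n rest (if rev then pos - 1 else pos + 1) rev)

-- appending one card into the bucket of its owner i, seen pointwise on all buckets
theorem unoStep (hands : List (List String)) (i : Int) (c : String) (S : Nat → List String)
    (hi0 : 0 ≤ i) (hiNat : i.toNat < hands.length) :
    List.mapIdx (fun p h => h ++ S p)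
      (PySem.List.pySetD hands i (PySem.List.pyGetD hands i [] ++ [c])) =
    List.mapIdx (fun p h => h ++ ((if i == (p : Int) then [c] else []) ++ S p)) hands := by
  rw [PySem.List.pySetD_of_nonneg _ _ hi0]
  apply List.ext_getElem
  · simp
  · intro k hk1 hk2
    simp only [List.getElem_mapIdx, List.getElem_set]
    by_cases hki : i.toNat = k
    · have hget : PySem.List.pyGetD hands i ([] : List String) = hands[i.toNat] :=
        PySem.List.pyGetD_eq_getElem hands [] hi0 (by omega)
      have hik : (i == (k : Int)) = true := by simp only [beq_iff_eq]; omega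
      simp [hki, hget, hik, List.append_assoc]
    · have hik : ¬ (i == (k : Int)) = true := by simp only [beq_iff_eq]; omega
      simp [hki, hik]

-- the head pair of a grouped run lands in hand p iff p is its owner
theorem unoGroupCons (co : String × Int) (l : List (String × Int)) (p : Nat) :
    ((co :: l).filter (fun x => x.2 == (p : Int))).map Prod.fst
    = (if co.2 == (p : Int) then [co.1] else [])
      ++ (l.filter (fun x => x.2 == (p : Int))).map Prod.fst := by
  simp only [List.filter_cons]
  split_ifs <;> simp

-- every owner A's state machine visits is a seat number: 0 ≤ o < n
theorem unoOwners_mem (n : Int) (hn : 0 < n) :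
    ∀ (cards : List String) (pos : Int) (rev : Bool),
      ∀ o ∈ unoOwners n cards pos rev, 0 ≤ o ∧ o < n := by
  intro cards
  induction cards with
  | nil => intro pos rev o ho; simp [unoOwners] at ho
  | cons c rest ih =>
      intro pos rev o ho
      simp only [unoOwners, List.mem_cons] at ho
      rcases ho with rfl | ho
      · exact ⟨PySem.Int.mod_nonneg pos (by omega), PySem.Int.mod_lt pos (by omega)⟩
      · split_ifs at ho <;> exact ih _ _ o ho

-- A's whole run, on hands of length n, appends to each seat exactly its cards as listed by unoOwners.
theorem unoDealA_eq (n : Int) (hn : 0 < n) :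
    ∀ (cards : List String) (hands : List (List String)) (pos : Int) (rev : Bool),
      hands.length = n.toNat →
      unoDealA n cards hands pos rev =
        hands.mapIdx (fun p h =>
          h ++ ((cards.zip (unoOwners n cards pos rev)).filter
                  (fun co => co.2 == (p : Int))).map Prod.fst) := by
  intro cards
  induction cards with
  | nil =>
      intro hands pos rev _
      simp [unoDealA, unoOwners, List.mapIdx_eq_zipIdx_map]
  | cons c rest ih =>
      intro hands pos rev hlen
      have hi0 : 0 ≤ PySem.Int.mod pos n := PySem.Int.mod_nonneg pos (by omega)
      have hilt : PySem.Int.mod pos n < n := PySem.Int.mod_lt pos (by omega)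
      have hiNat : (PySem.Int.mod pos n).toNat < hands.length := by rw [hlen]; omega
      have hlen' : ∀ c' : String,
          (PySem.List.pySetD hands (PySem.Int.mod pos n)
            (PySem.List.pyGetD hands (PySem.Int.mod pos n) [] ++ [c'])).length = n.toNat := by
        intro c'; rw [PySem.List.length_pySetD, hlen]
      by_cases hc1 : c = "reverse"
      · subst hc1
        cases rev <;>
          · simp only [unoDealA, unoOwners, String.reduceEq, Bool.false_eq_true, if_true, if_false]
            rw [ih _ _ _ (hlen' _)]
            simp only [List.zip_cons_cons, unoGroupCons]
            exact unoStep hands _ _ _ hi0 hiNat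
      · by_cases hc2 : c = "skip"
        · subst hc2
          simp only [unoDealA, unoOwners, String.reduceEq, if_true, if_false]
          rw [ih _ _ _ (hlen' _)]
          simp only [List.zip_cons_cons, unoGroupCons]
          exact unoStep hands _ _ _ hi0 hiNat
        · simp only [unoDealA, unoOwners, if_neg hc1, if_neg hc2]
          rw [ih _ _ _ (hlen' _)]
          simp only [List.zip_cons_cons, unoGroupCons]
          exact unoStep hands _ _ _ hi0 hiNat

-- B's sign/table arithmetic lists exactly the seats of A's state machine: with r reverses seen,
-- rev ↔ r odd, sign 1 - 2*(r % 2) = ±1, and BASE.get(c,1) * sign is A's advance in every branch.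
theorem unoSeats_eq (n : Int) :
    ∀ (cards : List String) (r pos : Int) (rev : Bool), 0 ≤ r →
      (rev = true ↔ PySem.Int.mod r 2 = 1) →
      unoSeats n (cards.zip (unoSigns cards r)) pos = unoOwners n cards pos rev := by
  intro cards
  induction cards with
  | nil => intro r pos rev _ _; simp [unoSigns, unoOwners, unoSeats]
  | cons c rest ih =>
      intro r pos rev hr hrev
      have hm0 : 0 ≤ PySem.Int.mod r 2 := PySem.Int.mod_nonneg r (by omega)
      have hm2 : PySem.Int.mod r 2 < 2 := PySem.Int.mod_lt r (by omega)
      have hmod : PySem.Int.mod r 2 = r % 2 := PySem.Int.mod_eq_emod_of_pos (by omega)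
      have hmod' : PySem.Int.mod (r + 1) 2 = (r + 1) % 2 :=
        PySem.Int.mod_eq_emod_of_pos (by omega)
      simp only [unoSigns, List.zip_cons_cons, unoSeats, unoOwners]
      by_cases hc1 : c = "reverse"
      · subst hc1
        simp only [if_true, String.reduceEq]
        cases rev with
        | true =>
            have h1 : PySem.Int.mod r 2 = 1 := hrev.mp rfl
            have h1' : r % 2 = 1 := hmod ▸ h1
            have hsign : 1 - 2 * PySem.Int.mod r 2 = -1 := by omega
            have hbase : unoBase.getD "reverse" 1 = -1 := by decide
            rw [hsign, hbase]
            have hpos : pos + -1 * -1 = pos + 1 := by ring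
            rw [hpos]
            exact congrArg _ (ih (r + 1) (pos + 1) false (by omega)
              (by rw [hmod']; simp only [Bool.false_eq_true, false_iff]; omega))
        | false =>
            have h0 : PySem.Int.mod r 2 = 0 := by
              rcases (by omega : PySem.Int.mod r 2 = 0 ∨ PySem.Int.mod r 2 = 1) with h | h
              · exact h
              · exact absurd (hrev.mpr h) (by simp)
            have h0' : r % 2 = 0 := hmod ▸ h0
            have hsign : 1 - 2 * PySem.Int.mod r 2 = 1 := by omega
            have hbase : unoBase.getD "reverse" 1 = -1 := by decide
            rw [hsign, hbase]
            have hpos : pos + -1 * 1 = pos - 1 := by ring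
            rw [hpos]
            exact congrArg _ (ih (r + 1) (pos - 1) true (by omega)
              (by rw [hmod']; simp only [true_iff]; omega))
      · have hmk : unoBase = PySem.Dict.mk [("reverse", -1), ("skip", 2)] := by decide
        have hbase : unoBase.getD c 1 = if c = "skip" then 2 else 1 := by
          rw [hmk]
          have hc1' : (("reverse" : String) == c) = false := by
            simp; exact fun h => hc1 h.symm
          by_cases hc2 : c = "skip"
          · subst hc2; decide
          · have hc2' : (("skip" : String) == c) = false := by
              simp; exact fun h => hc2 h.symm
            simp [PySem.Dict.getD, hc1', hc2', hc2, PySem.Dict.get?]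
        have hrtail : unoSigns rest (r + (if c = "reverse" then 1 else 0)) = unoSigns rest r := by
          simp [hc1]
        rw [hrtail, hbase]
        cases rev with
        | false =>
          have h0 : PySem.Int.mod r 2 = 0 := by
            rcases (by omega : PySem.Int.mod r 2 = 0 ∨ PySem.Int.mod r 2 = 1) with h | h
            · exact h
            · exact absurd (hrev.mpr h) (by simp)
          have hsign : 1 - 2 * PySem.Int.mod r 2 = 1 := by omega
          rw [hsign]
          by_cases hc2 : c = "skip"
          · subst hc2
            simp only [if_true, String.reduceEq, Bool.false_eq_true, if_false]
            have hpos : pos + 2 * 1 = pos + 2 := by ring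
            rw [hpos]
            exact congrArg _ (ih r (pos + 2) false hr hrev)
          · simp only [if_neg hc1, if_neg hc2, Bool.false_eq_true, if_false]
            have hpos : pos + 1 * 1 = pos + 1 := by ring
            rw [hpos]
            exact congrArg _ (ih r (pos + 1) false hr hrev)
        | true =>
          have h1 : PySem.Int.mod r 2 = 1 := hrev.mp rfl
          have hsign : 1 - 2 * PySem.Int.mod r 2 = -1 := by omega
          rw [hsign]
          by_cases hc2 : c = "skip"
          · subst hc2
            simp only [if_true, String.reduceEq, if_false]
            have hpos : pos + 2 * -1 = pos - 2 := by ring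
            rw [hpos]
            exact congrArg _ (ih r (pos - 2) true hr hrev)
          · simp only [if_neg hc1, if_neg hc2, if_true]
            have hpos : pos + 1 * -1 = pos - 1 := by ring
            rw [hpos]
            exact congrArg _ (ih r (pos - 1) true hr hrev)

-- B's bucket sweep, on buckets of length n, appends to each seat exactly its cards of the pair list.
theorem unoBucket_eq (n : Int) (hn : 0 < n) :
    ∀ (l : List (String × Int)) (hands : List (List String)),
      hands.length = n.toNat →
      (∀ co ∈ l, 0 ≤ co.2 ∧ co.2 < n) →
      l.foldl (fun h co => PySem.List.pySetD h co.2 (PySem.List.pyGetD h co.2 [] ++ [co.1])) hands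
        = hands.mapIdx (fun p h =>
            h ++ (l.filter (fun co => co.2 == (p : Int))).map Prod.fst) := by
  intro l
  induction l with
  | nil =>
      intro hands _ _
      simp [List.mapIdx_eq_zipIdx_map]
  | cons co rest ih =>
      intro hands hlen hin
      have hco := hin co (by simp)
      have hiNat : co.2.toNat < hands.length := by rw [hlen]; omega
      rw [List.foldl_cons,
          ih _ (by rw [PySem.List.length_pySetD, hlen]) (fun x hx => hin x (by simp [hx]))]
      simp only [unoGroupCons]
      exact unoStep hands _ _ _ hco.1 hiNat

-- A's initial loop builds one empty hand per player.
theorem unoInit_eq (n : Int) :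
    (PySem.List.pyRange 0 n 1).foldl (fun h _ => h ++ [([] : List String)]) []
      = (PySem.List.pyRange 0 n 1).map (fun _ => ([] : List String)) := by
  suffices h : ∀ (l : List Int) (acc : List (List String)),
      l.foldl (fun h _ => h ++ [([] : List String)]) acc = acc ++ l.map (fun _ => []) by
    simp [h (PySem.List.pyRange 0 n 1) []]
  intro l
  induction l with
  | nil => simp
  | cons x xs ih => intro acc; simp [List.foldl_cons, ih]

-- ===== VERDICT =====
theorem uno_who_played_what_spec : Claim_equal_uno_who_played_what := by
  intro cards n s _ hpre
  unfold Spec_uno_who_played_what uno_who_played_what uno_who_played_what_alt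
  rw [unoInit_eq]
  simp only []
  rcases hpre with hnil | hn
  · subst hnil
    simp [unoDealA, unoSigns, unoSeats]
  · have hlen : ((PySem.List.pyRange 0 n 1).map (fun _ => ([] : List String))).length = n.toNat := by
      simp [PySem.List.length_pyRange_one]
    rw [unoSeats_eq n cards 0 s false (le_refl 0) (by decide)]
    rw [unoDealA_eq n hn cards _ s false hlen,
        unoBucket_eq n hn _ _ hlen
          (fun co hco => unoOwners_mem n hn cards s false co.2 (List.of_mem_zip hco).2)]
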